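-- pv_equiv track=rewrite | github.com/romeorizzi/temi_prog_public | 2019.02.27.recupero/all-CMS-submissions-2019-02-27/20190227T103918.VR429228000.conta-minimi-storici.py | conta_minimi_storici_dispari
-- ===== SOURCE A (Python) =====
-- def conta_minimi_storici_dispari(st_list):
--     count=0
--     if (st_list[0]%2)!=0:
--         count=count+1
--     i=1
--     l=len(st_list)
--     m=st_list[0]
--     while (i<l):
--         if st_list[i]<m:
--             if (st_list[i]%2)!=0:
--                 count=count+1
--             m=st_list[i]
--         i=i+1
--     return count
-- ===== SOURCE B (Python) =====
-- def conta_minimi_storici_dispari(st_list):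
--     return sum(1 for i, x in enumerate(st_list)
--                if x % 2 != 0 and all(st_list[j] > x for j in range(i)))
-- ===== Notes on version B (the rewrite author's own statement) =====
-- stated objective: alternative
-- what changed: B drops the running-minimum state entirely: it is a stateless nested-scan formulation that for each position i rechecks the earlier elements (all(st_list[j] > x for j in range(i)), short-circuiting) to decide whether x is a strict historical minimum, counting odd ones with one sum over a generator; A is a single stateful pass updating a running minimum.
import Mathlib
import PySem

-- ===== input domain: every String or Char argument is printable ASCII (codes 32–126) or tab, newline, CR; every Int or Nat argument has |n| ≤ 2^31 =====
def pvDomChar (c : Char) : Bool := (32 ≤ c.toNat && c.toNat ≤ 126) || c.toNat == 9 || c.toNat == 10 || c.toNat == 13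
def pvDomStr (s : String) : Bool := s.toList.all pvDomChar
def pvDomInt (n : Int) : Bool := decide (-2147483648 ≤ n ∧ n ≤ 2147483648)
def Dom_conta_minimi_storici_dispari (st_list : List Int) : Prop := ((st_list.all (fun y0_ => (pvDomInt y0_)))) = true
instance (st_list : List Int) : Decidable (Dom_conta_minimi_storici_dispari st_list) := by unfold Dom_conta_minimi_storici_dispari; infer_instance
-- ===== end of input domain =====

-- B is a stateless nested-scan formulation: for each position it rechecks the whole prefix
-- to decide "strict historical minimum", instead of A's single stateful running-minimum pass.


-- ===== PORT A =====
-- while loop over the tail, carrying the running minimum m and the count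
def contaLoopA : List Int → Int → Int → Int
  | [], _, count => count
  | x :: xs, m, count =>
      if x < m then
        contaLoopA xs x (if x % 2 ≠ 0 then count + 1 else count)
      else
        contaLoopA xs m count

def conta_minimi_storici_dispari (st_list : List Int) : Int :=
  match st_list with
  | [] => 0  -- st_list[0] raises IndexError in Python: excluded by Pre_
  | h :: t => contaLoopA t h (if h % 2 ≠ 0 then 1 else 0)

-- ===== PORT B =====
-- sum(1 for i, x in enumerate(st_list) if x % 2 != 0 and all(st_list[j] > x for j in range(i)))
-- st_list[j] for j in range(i) is always in range, so PySem.List.pyGetD is exact here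
def conta_minimi_storici_dispari_alt (st_list : List Int) : Int :=
  (PySem.List.enumerate st_list 0).foldl
    (fun c ix =>
      if ix.2 % 2 ≠ 0 ∧ (PySem.List.pyRange 0 ix.1 1).all (fun j => ix.2 < PySem.List.pyGetD st_list j 0) then c + 1 else c) 0

-- ===== PRECONDITION & SPEC =====
-- Pre_ excludes only the empty list, on which A raises IndexError (st_list[0]).
def Pre_conta_minimi_storici_dispari (st_list : List Int) : Prop := st_list ≠ []
instance (st_list : List Int) : Decidable (Pre_conta_minimi_storici_dispari st_list) := by unfold Pre_conta_minimi_storici_dispari; infer_instance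
def pvWitness_conta_minimi_storici_dispari : List Int := [3, 1, 2]

def Spec_conta_minimi_storici_dispari (st_list : List Int) (out : Int) : Prop := out = conta_minimi_storici_dispari_alt st_list
instance (st_list : List Int) (out : Int) : Decidable (Spec_conta_minimi_storici_dispari st_list out) := by unfold Spec_conta_minimi_storici_dispari; infer_instance

-- ===== CLAIM =====
def Claim_equal_conta_minimi_storici_dispari : Prop := ∀ (st_list : List Int), Dom_conta_minimi_storici_dispari st_list → Pre_conta_minimi_storici_dispari st_list → Spec_conta_minimi_storici_dispari st_list (conta_minimi_storici_dispari st_list)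

-- ===== LEMMAS AND PROOFS =====

-- B's step function, named for the proofs (definitionally the lambda in the port)
def stepB (xs : List Int) (c : Int) (ix : Int × Int) : Int :=
  if ix.2 % 2 ≠ 0 ∧ (PySem.List.pyRange 0 ix.1 1).all (fun j => ix.2 < PySem.List.pyGetD xs j 0) then c + 1 else c

-- the index loop "all(st_list[j] > x for j in range(k))" tests exactly the length-k prefix
lemma range_all_eq_take_all (xs : List Int) (x : Int) (k : Nat) (hk : k ≤ xs.length) :
    ((PySem.List.pyRange 0 (k : Int) 1).all fun j => decide (x < PySem.List.pyGetD xs j 0)) =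
      ((xs.take k).all fun y => decide (x < y)) := by
  rw [PySem.List.pyRange_one]
  simp only [sub_zero, Int.toNat_natCast, List.all_map, zero_add]
  rw [Bool.eq_iff_iff]
  simp only [List.all_eq_true, List.mem_range, decide_eq_true_eq, Function.comp,
    PySem.List.pyGetD_natCast]
  constructor
  · intro h y hy
    obtain ⟨j, hj, rfl⟩ := List.getElem_of_mem hy
    have hjk : j < k := lt_of_lt_of_le hj (by simp [List.length_take])
    have := h j hjk
    rwa [List.getD_eq_getElem xs 0 (lt_of_lt_of_le hjk hk), ← List.getElem_take] at this
  · intro h j hj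
    rw [List.getD_eq_getElem xs 0 (lt_of_lt_of_le hj hk)]
    exact h _ (by rw [← List.getElem_take]; exact List.getElem_mem (by simp [List.length_take]; omega))

-- prefix-all vs running-minimum: if m is a member of p and a lower bound of p,
-- then "all of p are > x" is equivalent to "x < m"
lemma all_gt_iff_lt_min {p : List Int} {m x : Int}
    (hmem : m ∈ p) (hlb : ∀ y ∈ p, m ≤ y) :
    (p.all (fun y => decide (x < y))) = true ↔ x < m := by
  simp only [List.all_eq_true, decide_eq_true_eq]
  constructor
  · intro h; exact h m hmem
  · intro hx y hy; exact lt_of_lt_of_le hx (hlb y hy)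

-- main invariant: folding B's step over the enumeration of the remaining suffix r
-- (starting at index k, with xs = xs.take k ++ r, and m the minimum of the prefix)
-- computes A's running-minimum loop
lemma fold_eq_loopA : ∀ (r xs : List Int) (k : Nat) (m c : Int),
    xs = xs.take k ++ r →
    m ∈ xs.take k → (∀ y ∈ xs.take k, m ≤ y) →
    (PySem.List.enumerate r (k : Int)).foldl (stepB xs) c = contaLoopA r m c := by
  intro r
  induction r with
  | nil => intro xs k m c _ _ _; simp [PySem.List.enumerate_nil, contaLoopA]
  | cons x rs ih =>
    intro xs k m c hsplit hmem hlb
    have htake : xs.take (k + 1) = xs.take k ++ [x] := by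
      conv_lhs => rw [hsplit]
      rw [List.take_append]
      have hlen : (xs.take k).length = k := by
        have : k ≤ xs.length := by
          have hl := congrArg List.length hsplit
          simp [List.length_append, List.length_take] at hl
          omega
        simp [List.length_take, this]
      simp [hlen]
    have hk1 : ((k : Int) + 1) = ((k + 1 : Nat) : Int) := by push_cast; ring
    have hsplit' : xs = xs.take (k + 1) ++ rs := by
      rw [htake, List.append_assoc]; simpa using hsplit
    rw [PySem.List.enumerate_cons, List.foldl_cons, hk1]
    have hstep : stepB xs c ((k : Int), x) =
        if x % 2 ≠ 0 ∧ x < m then c + 1 else c := by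
      unfold stepB
      have hk : k ≤ xs.length := by
        have hl := congrArg List.length hsplit
        simp [List.length_append, List.length_take] at hl
        omega
      rw [range_all_eq_take_all xs x k hk]
      by_cases hxm : x < m
      · have hall := (all_gt_iff_lt_min hmem hlb).2 hxm
        simp [hall, hxm]
      · have hall : (List.all (xs.take k) fun y => decide (x < y)) = false := by
          by_contra h
          exact hxm ((all_gt_iff_lt_min hmem hlb).1 (eq_true_of_ne_false h))
        simp [hall, hxm]
    rw [hstep]
    by_cases hxm : x < m
    · have hmem' : x ∈ xs.take (k + 1) := by rw [htake]; simp
      have hlb' : ∀ y ∈ xs.take (k + 1), x ≤ y := by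
        intro y hy; rw [htake] at hy
        rcases List.mem_append.1 hy with h | h
        · exact le_of_lt (lt_of_lt_of_le hxm (hlb y h))
        · simp at h; omega
      rw [ih xs (k + 1) x _ hsplit' hmem' hlb']
      simp [contaLoopA, hxm]
    · have hmem' : m ∈ xs.take (k + 1) := by rw [htake]; exact List.mem_append_left _ hmem
      have hlb' : ∀ y ∈ xs.take (k + 1), m ≤ y := by
        intro y hy; rw [htake] at hy
        rcases List.mem_append.1 hy with h | h
        · exact hlb y h
        · simp at h; omega
      rw [ih xs (k + 1) m _ hsplit' hmem' hlb']
      have : ¬ (x % 2 ≠ 0 ∧ x < m) := by tauto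
      simp [contaLoopA, hxm]

-- ===== VERDICT =====
theorem conta_minimi_storici_dispari_spec : Claim_equal_conta_minimi_storici_dispari := by
  intro st_list _ hpre
  unfold Spec_conta_minimi_storici_dispari
  cases st_list with
  | nil => exact absurd rfl hpre
  | cons h t =>
    show conta_minimi_storici_dispari (h :: t) =
      (PySem.List.enumerate (h :: t) 0).foldl (stepB (h :: t)) 0
    rw [PySem.List.enumerate_cons, List.foldl_cons]
    have h0 : stepB (h :: t) 0 (0, h) = (if h % 2 ≠ 0 then 1 else 0) := by
      unfold stepB; simp
    have hc : (0 : Int) + 1 = ((1 : Nat) : Int) := by norm_num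
    rw [h0, hc, fold_eq_loopA t (h :: t) 1 h _ (by simp) (by simp) (by simp)]
    rfl
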